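-- pv_equiv track=rewrite | github.com/shinkeonkim/BOJ | 33000~33999/33900~33999/33937.py | f
-- ===== SOURCE A (Python) =====
-- def f(s):
--   ret = ""
--   chk = False
--
--   for i in s:
--     if i in "aeiou":
--       chk = True
--     else:
--       if chk:
--         return ret
--     ret += i
--
--   return ""
-- ===== SOURCE B (Python) =====
-- def f(s):
--     vowels = "aeiou"
--     v = next((i for i, c in enumerate(s) if c in vowels), None)
--     if v is None:
--         return ""
--     j = next((i for i in range(v + 1, len(s)) if s[i] not in vowels), None)
--     if j is None:
--         return ""
--     return s[:j]
-- ===== Notes on version B (the rewrite author's own statement) =====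
-- stated objective: alternative
-- what changed: Replaces A's single accumulating scan (growing ret string plus chk flag) by index-finding and slicing: locate the first vowel, then the first non-vowel after it, and return s[:j].
import Mathlib
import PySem

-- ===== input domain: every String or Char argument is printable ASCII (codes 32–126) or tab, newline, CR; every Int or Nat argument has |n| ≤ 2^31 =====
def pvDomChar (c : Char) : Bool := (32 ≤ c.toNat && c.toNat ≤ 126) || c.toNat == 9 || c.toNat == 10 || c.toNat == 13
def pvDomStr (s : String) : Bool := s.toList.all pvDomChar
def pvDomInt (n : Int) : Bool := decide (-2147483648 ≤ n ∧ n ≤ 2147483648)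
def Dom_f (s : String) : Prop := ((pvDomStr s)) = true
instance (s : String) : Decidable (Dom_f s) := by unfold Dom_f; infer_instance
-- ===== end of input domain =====

-- B replaces A's accumulating scan (ret string + chk flag) by index-finding plus slicing; alternative decomposition.

-- membership test `i in "aeiou"`, shared character predicate
def vowel (c : Char) : Bool := c == 'a' || c == 'e' || c == 'i' || c == 'o' || c == 'u'

-- ===== PORT A =====
-- A's loop: ret accumulator (as List Char) and chk flag, early return of ret
def fLoop : List Char → List Char → Bool → String
  | [], _, _ => ""
  | c :: rest, ret, chk =>
    if vowel c then fLoop rest (ret ++ [c]) true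
    else if chk then String.mk ret
    else fLoop rest (ret ++ [c]) chk

def f (s : String) : String := fLoop s.toList [] false

-- ===== PORT B =====
-- index of the first element satisfying p (Source B's next((i for i,c in enumerate ...)))
def firstIdx (p : Char → Bool) : List Char → Option Nat
  | [] => none
  | c :: rest => if p c then some 0 else (firstIdx p rest).map (· + 1)

def f_alt (s : String) : String :=
  let l := s.toList
  match firstIdx vowel l with
  | none => ""
  | some v =>
    match firstIdx (fun c => !vowel c) (l.drop (v + 1)) with
    | none => ""
    | some k => String.mk (l.take (v + 1 + k))

-- ===== PRECONDITION & SPEC =====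
def Spec_f (s : String) (out : String) : Prop := out = f_alt s
instance (s : String) (out : String) : Decidable (Spec_f s out) := by unfold Spec_f; infer_instance

-- ===== CLAIM (what is proved, stated in full; the proofs are below) =====
def Claim_equal_f : Prop := ∀ (s : String), Dom_f s → Spec_f s (f s)

-- ===== LEMMAS AND PROOFS =====

-- chk = true phase: returns ret at the first non-vowel, "" if none
theorem fLoop_true (l : List Char) : ∀ ret : List Char,
    fLoop l ret true =
      match firstIdx (fun c => !vowel c) l with
      | none => ""
      | some k => String.mk (ret ++ l.take k) := by
  induction l with
  | nil => intro ret; simp [fLoop, firstIdx]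
  | cons c rest ih =>
    intro ret
    by_cases hv : vowel c = true
    · simp only [fLoop, firstIdx, hv, if_pos, Bool.not_true, ih (ret ++ [c])]
      cases firstIdx (fun c => !vowel c) rest with
      | none => simp
      | some k => simp [List.take_succ_cons]
    · simp [fLoop, firstIdx, hv]

-- chk = false phase: skips to just past the first vowel, accumulating
theorem fLoop_false (l : List Char) : ∀ ret : List Char,
    fLoop l ret false =
      match firstIdx vowel l with
      | none => ""
      | some v => fLoop (l.drop (v + 1)) (ret ++ l.take (v + 1)) true := by
  induction l with
  | nil => intro ret; simp [fLoop, firstIdx]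
  | cons c rest ih =>
    intro ret
    by_cases hv : vowel c = true
    · simp [fLoop, firstIdx, hv, List.take_succ_cons]
    · simp only [fLoop, firstIdx, hv, if_neg, Bool.false_eq_true, not_false_iff, ih (ret ++ [c])]
      cases firstIdx vowel rest with
      | none => simp
      | some v => simp [List.take_succ_cons, List.drop_succ_cons]

-- ===== VERDICT (by name: the statement is the Claim_ definition above) =====
theorem f_spec : Claim_equal_f := by
  intro s _
  unfold Spec_f f f_alt
  rw [fLoop_false]
  cases hv : firstIdx vowel s.toList with
  | none => simp [hv]
  | some v =>
    simp only [hv, fLoop_true]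
    cases hk : firstIdx (fun c => !vowel c) (s.toList.drop (v + 1)) with
    | none => simp
    | some k => simp only [List.nil_append, List.take_add]
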